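-- pv_equiv track=rewrite | github.com/basilegithub/General-number-field-sieve | src/polynomial_functions.py | eval_F
-- ===== SOURCE A (Python) =====
-- def eval_F(x, y, f, d):
--     tmp = 0
--     tmp2 = 1
--
--     for k in range(d):
--         tmp += f[k]*tmp2
--         tmp *= x
--         tmp2 *= y
--
--     tmp += f[d]*tmp2
--
--     return tmp
-- ===== SOURCE B (Python) =====
-- def eval_F(x, y, f, d):
--     xpow = [1]
--     ypow = [1]
--     for _ in range(d):
--         xpow.append(xpow[-1] * x)
--         ypow.append(ypow[-1] * y)
--     total = 0
--     for k in range(d + 1):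
--         total += f[k] * xpow[d - k] * ypow[k]
--     return total
-- ===== Notes on version B (the rewrite author's own statement) =====
-- stated objective: alternative
-- what changed: Replaces Horner's incremental two-accumulator pass (a running value multiplied by x each step alongside a running power of y) by precomputed power tables for x and y followed by a direct sum of the independent monomials f[k]*x^(d-k)*y^k.
-- outside the precondition, e.g. on eval_F(2, 3, [1, 2, 5], -1): A returns 5, B returns 0; on eval_F(2, 3, [1, 2, 5], -2): A returns 2, B returns 0
import Mathlib
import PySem

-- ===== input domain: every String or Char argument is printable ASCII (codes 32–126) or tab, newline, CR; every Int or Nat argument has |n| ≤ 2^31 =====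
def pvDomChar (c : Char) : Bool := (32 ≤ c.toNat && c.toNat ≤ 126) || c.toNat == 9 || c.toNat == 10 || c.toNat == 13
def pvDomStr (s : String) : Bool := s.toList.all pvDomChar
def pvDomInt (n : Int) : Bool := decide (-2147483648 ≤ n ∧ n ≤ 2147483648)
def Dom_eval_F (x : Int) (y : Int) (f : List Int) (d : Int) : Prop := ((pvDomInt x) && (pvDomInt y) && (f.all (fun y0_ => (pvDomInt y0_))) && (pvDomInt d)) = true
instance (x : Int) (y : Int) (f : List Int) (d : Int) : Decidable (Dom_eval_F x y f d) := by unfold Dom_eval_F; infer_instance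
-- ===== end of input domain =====

-- B replaces Horner's incremental pass by precomputed x/y power tables plus a direct sum of the monomials f[k]*x^(d-k)*y^k (alternative structure, not faster).

-- ===== PORT A =====
def eval_F (x : Int) (y : Int) (f : List Int) (d : Int) : Int :=
  let s := (PySem.List.pyRange 0 d 1).foldl
    (fun (p : Int × Int) k => ((p.1 + PySem.List.pyGetD f k 0 * p.2) * x, p.2 * y))
    (0, 1)
  s.1 + PySem.List.pyGetD f d 0 * s.2

-- ===== PORT B =====
def eval_F_alt (x : Int) (y : Int) (f : List Int) (d : Int) : Int :=
  let pows := (PySem.List.pyRange 0 d 1).foldl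
    (fun (p : List Int × List Int) _ =>
      (p.1 ++ [PySem.List.pyGetD p.1 (-1) 0 * x], p.2 ++ [PySem.List.pyGetD p.2 (-1) 0 * y]))
    ([1], [1])
  (PySem.List.pyRange 0 (d + 1) 1).foldl
    (fun total k =>
      total + PySem.List.pyGetD f k 0 * PySem.List.pyGetD pows.1 (d - k) 0
        * PySem.List.pyGetD pows.2 k 0)
    0

-- ===== PRECONDITION & SPEC =====
-- Pre_ restricts to the natural domain of a degree-d coefficient list (0 ≤ d < len(f));
-- outside it A either raises IndexError (d ≥ len(f) or d < -len(f)) or, for negative d,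
-- returns f[d] by Python's negative-index wraparound, which Pre_ excludes rather than mimics.
def Pre_eval_F (x : Int) (y : Int) (f : List Int) (d : Int) : Prop :=
  0 ≤ d ∧ d < (f.length : Int)
instance (x : Int) (y : Int) (f : List Int) (d : Int) : Decidable (Pre_eval_F x y f d) := by
  unfold Pre_eval_F; infer_instance

def pvWitness_eval_F : Int × Int × List Int × Int := (2, 3, [1, 2, 5], 2)

def Spec_eval_F (x : Int) (y : Int) (f : List Int) (d : Int) (out : Int) : Prop := out = eval_F_alt x y f d
instance (x : Int) (y : Int) (f : List Int) (d : Int) (out : Int) : Decidable (Spec_eval_F x y f d out) := by unfold Spec_eval_F; infer_instance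

-- ===== CLAIM (what is proved, stated in full; the proofs are below) =====
def Claim_equal_eval_F : Prop := ∀ (x : Int) (y : Int) (f : List Int) (d : Int), Dom_eval_F x y f d → Pre_eval_F x y f d → Spec_eval_F x y f d (eval_F x y f d)

-- ===== LEMMAS AND PROOFS =====

-- Horner invariant: after n iterations the state is (∑_{k<n} f[k]·x^(n-k)·y^k, y^n).
theorem eval_F_loop (x y : Int) (f : List Int) (n : Nat) :
    ((List.range n).map (fun (k : Nat) => (k : Int))).foldl
      (fun (p : Int × Int) k => ((p.1 + PySem.List.pyGetD f k 0 * p.2) * x, p.2 * y)) (0, 1)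
    = (((List.range n).map
          (fun (k : Nat) => PySem.List.pyGetD f (k : Int) 0 * x ^ (n - k) * y ^ k)).sum, y ^ n) := by
  induction n with
  | zero => simp
  | succ n ih =>
    rw [List.range_succ, List.map_append, List.foldl_append, ih, List.map_append]
    simp only [List.map_cons, List.map_nil, List.foldl_cons, List.foldl_nil, List.sum_append,
      List.sum_cons, List.sum_nil]
    refine Prod.ext ?_ (by simp [pow_succ])
    simp only [add_mul, add_zero]
    rw [← List.sum_map_mul_right]
    congr 1
    · refine congrArg List.sum (List.map_congr_left fun k hk => ?_)
      have hklt : k < n := List.mem_range.mp hk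
      rw [show n + 1 - k = (n - k) + 1 by omega, pow_succ]
      ring
    · rw [show n + 1 - n = 1 by omega, pow_one]
      ring

-- The power-table loop builds [z^0, …, z^m] (then m more steps extend it to z^(m+len)).
theorem pow_table_fold (z : Int) (L : List Int) (m : Nat) :
    L.foldl (fun l _ => l ++ [PySem.List.pyGetD l (-1) 0 * z])
      ((List.range (m + 1)).map (fun k => z ^ k))
    = (List.range (m + 1 + L.length)).map (fun k => z ^ k) := by
  induction L generalizing m with
  | nil => simp
  | cons c t ih =>
    rw [List.foldl_cons]
    have hlast : PySem.List.pyGetD ((List.range (m + 1)).map (fun k => z ^ k)) (-1) 0 = z ^ m := by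
      rw [List.range_succ, List.map_append]
      simp [PySem.List.pyGetD, PySem.List.pyGet?, PySem.List.pyIdx?]
    rw [hlast, show (List.range (m + 1)).map (fun k => z ^ k) ++ [z ^ m * z]
        = (List.range (m + 1 + 1)).map (fun k => z ^ k) by
      rw [List.range_succ (n := m + 1), List.map_append]; simp [pow_succ], ih]
    congr 2
    simp only [List.length_cons]
    omega

-- B's loop is the same sum of monomials.
theorem eval_F_alt_sum (x y : Int) (f : List Int) (n : Nat) :
    eval_F_alt x y f (n : Int)
    = ((List.range (n + 1)).map
        (fun (k : Nat) => PySem.List.pyGetD f (k : Int) 0 * x ^ (n - k) * y ^ k)).sum := by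
  have hx := pow_table_fold x (PySem.List.pyRange 0 (n : Int) 1) 0
  have hy := pow_table_fold y (PySem.List.pyRange 0 (n : Int) 1) 0
  rw [PySem.List.length_pyRange_one, show 0 + 1 + (((n : Int) - 0).toNat) = n + 1 by omega,
    show (List.range (0 + 1)).map (fun k => x ^ k) = [1] by simp] at hx
  rw [PySem.List.length_pyRange_one, show 0 + 1 + (((n : Int) - 0).toNat) = n + 1 by omega,
    show (List.range (0 + 1)).map (fun k => y ^ k) = [1] by simp] at hy
  simp only [eval_F_alt]
  rw [PySem.List.foldl_prod_mk
      (fun (l : List Int) (_ : Int) => l ++ [PySem.List.pyGetD l (-1) 0 * x])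
      (fun (l : List Int) (_ : Int) => l ++ [PySem.List.pyGetD l (-1) 0 * y])
      (PySem.List.pyRange 0 (n : Int) 1) [1] [1],
    hx, hy, PySem.List.foldl_add, show (n : Int) + 1 = ((n + 1 : Nat) : Int) by push_cast; ring,
    PySem.List.pyRange_zero_nat, List.map_map, zero_add]
  refine congrArg List.sum (List.map_congr_left fun k hk => ?_)
  have hkle : k < n + 1 := List.mem_range.mp hk
  simp only [Function.comp]
  rw [show (n : Int) - (k : Int) = ((n - k : Nat) : Int) by omega,
    PySem.List.pyGetD_natCast, PySem.List.pyGetD_natCast, PySem.List.pyGetD_natCast,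
    PySem.List.getD_map_range _ _ _ _ (by omega), PySem.List.getD_map_range _ _ _ _ (by omega)]

-- ===== VERDICT (by name: the statement is the Claim_ definition above) =====
theorem eval_F_spec : Claim_equal_eval_F := by
  intro x y f d _ hpre
  obtain ⟨hd0, _⟩ := hpre
  obtain ⟨n, rfl⟩ := Int.eq_ofNat_of_zero_le hd0
  unfold Spec_eval_F
  simp only [eval_F, PySem.List.pyRange_zero_nat, eval_F_alt_sum]
  rw [eval_F_loop]
  rw [List.range_succ, List.map_append, List.sum_append]
  simp
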